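-- pv_equiv track=rewrite | github.com/Im-sy/Algorithm | Programmers/폰켓몬.py | solution
-- ===== SOURCE A (Python) =====
-- from collections import Counter
--
-- def solution(nums):
--     answer = 0
--     cnt = Counter(nums)
--     target = len(nums)//2
--     tmp = 0
--     for mon in cnt.keys():
--         if tmp == target:
--             break
--         answer += 1
--         tmp += 1
--     return answer
-- ===== SOURCE B (Python) =====
-- def solution(nums):
--     return min(len(set(nums)), len(nums) // 2)
-- ===== Notes on version B (the rewrite author's own statement) =====
-- stated objective: simpler
-- what changed: Replaced A's Counter plus an explicit capped counting loop with break by the closed form min(len(set(nums)), len(nums)//2).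
import Mathlib
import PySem

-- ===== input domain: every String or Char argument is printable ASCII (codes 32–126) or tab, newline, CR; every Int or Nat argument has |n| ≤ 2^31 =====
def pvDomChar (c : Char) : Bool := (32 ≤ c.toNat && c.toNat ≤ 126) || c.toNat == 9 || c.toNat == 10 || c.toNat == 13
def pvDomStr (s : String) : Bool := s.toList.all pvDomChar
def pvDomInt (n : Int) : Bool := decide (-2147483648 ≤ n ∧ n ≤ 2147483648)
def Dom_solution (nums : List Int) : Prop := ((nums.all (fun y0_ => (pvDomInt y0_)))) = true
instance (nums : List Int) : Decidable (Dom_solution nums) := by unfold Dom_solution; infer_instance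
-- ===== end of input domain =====

-- B replaces A's Counter + capped counting loop by the closed form min(distinct, len//2): simpler.

-- ===== PORT A =====
-- the 'for mon in cnt.keys(): if tmp == target: break; answer += 1; tmp += 1' loop
def solutionLoopA : List Int → Int → Int → Int → Int
  | [], answer, _, _ => answer
  | _ :: rest, answer, tmp, target =>
      if tmp = target then answer
      else solutionLoopA rest (answer + 1) (tmp + 1) target

def solution (nums : List Int) : Int :=
  solutionLoopA (PySem.Dict.counter nums).keys 0 0 (PySem.Int.floordiv nums.length 2)

-- ===== PORT B =====
def solution_alt (nums : List Int) : Int :=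
  min (PySem.Set.len (PySem.Set.ofList nums)) (PySem.Int.floordiv nums.length 2)

-- ===== PRECONDITION & SPEC =====
def Spec_solution (nums : List Int) (out : Int) : Prop := out = solution_alt nums
instance (nums : List Int) (out : Int) : Decidable (Spec_solution nums out) := by unfold Spec_solution; infer_instance

-- ===== CLAIM (what is proved, stated in full; the proofs are below) =====
def Claim_equal_solution : Prop := ∀ (nums : List Int), Dom_solution nums → Spec_solution nums (solution nums)

-- ===== LEMMAS AND PROOFS =====
theorem solutionLoopA_eq (ks : List Int) (answer tmp target : Int) (h : tmp ≤ target) :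
    solutionLoopA ks answer tmp target = answer + min (ks.length : Int) (target - tmp) := by
  induction ks generalizing answer tmp with
  | nil => simp [solutionLoopA]; omega
  | cons k rest ih =>
      simp only [solutionLoopA]
      split_ifs with hb
      · subst hb; simp; omega
      · rw [ih (answer + 1) (tmp + 1) (by omega)]
        simp only [List.length_cons]
        push_cast
        omega

-- ===== VERDICT (by name: the statement is the Claim_ definition above) =====
theorem solution_spec : Claim_equal_solution := by
  unfold Claim_equal_solution
  intro nums _
  unfold Spec_solution solution solution_alt
  rw [PySem.Dict.keys_counter,
      solutionLoopA_eq _ 0 0 _ (by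
        rw [PySem.Int.floordiv_eq_ediv_of_pos (by omega)]; positivity)]
  rw [PySem.Int.floordiv_eq_ediv_of_pos (by omega)]
  simp [PySem.Set.len]
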